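-- pv_equiv track=rewrite | github.com/Xilinx/ml-suite | xfdnn/tools/emu/bunch_fpga_layer.py | TFlayerName2QuantizeKey
-- ===== SOURCE A (Python) =====
-- def TFlayerName2QuantizeKey(name):
--   origName = name
--   try:
--     name = name.split("/", 1)[0]
--     underscores = [i for i, ltr in enumerate(name) if ltr == '_']
--     name_list = list(name)
--     if len(underscores) <= 2:
--       if "inception" in name:
--         name_list[underscores[1]] = '/'
--       else:
--         name_list[underscores[0]] = '/'
--     elif len(underscores) > 2:
--       name_list[underscores[1]] = '/'
--     name = ''.join(name_list)
--   except:
--     name = origName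
--
--   return name
-- ===== SOURCE B (Python) =====
-- def TFlayerName2QuantizeKey(name):
--   base = name.partition("/")[0]
--   if base.count("_") <= 2 and "inception" not in base:
--     head, sep, tail = base.partition("_")
--     if not sep:
--       return name
--     return head + "/" + tail
--   h1, _, rest = base.partition("_")
--   h2, sep2, tail2 = rest.partition("_")
--   if not sep2:
--     return name
--   return h1 + "_" + h2 + "/" + tail2
-- ===== Notes on version B (the rewrite author's own statement) =====
-- stated objective: simpler
-- what changed: B replaces A's enumerate-all-underscore-indices, char-list mutation, join and try/except fallback with three str.partition calls and plain string concatenation, branching once on the underscore count.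
import Mathlib
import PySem

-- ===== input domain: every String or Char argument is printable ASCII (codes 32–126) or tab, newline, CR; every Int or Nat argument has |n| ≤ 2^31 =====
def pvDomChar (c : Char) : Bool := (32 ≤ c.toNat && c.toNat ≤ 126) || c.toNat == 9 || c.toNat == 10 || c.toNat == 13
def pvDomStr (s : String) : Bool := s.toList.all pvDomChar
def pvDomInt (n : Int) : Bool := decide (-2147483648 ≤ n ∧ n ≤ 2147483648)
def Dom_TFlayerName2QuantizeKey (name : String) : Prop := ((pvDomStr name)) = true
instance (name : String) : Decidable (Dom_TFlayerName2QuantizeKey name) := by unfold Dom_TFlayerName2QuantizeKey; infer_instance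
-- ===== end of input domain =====

-- B replaces A's enumerate-all-underscores + char-list mutation + try/except with
-- three str.partition calls and plain concatenation (objective: simpler).

-- ===== PORT A =====
-- literal port of A: split('/',1)[0]; list of underscore indices via enumerate; pick
-- index 0 or 1; name_list[idx] = '/' (pySet?); ''.join(name_list); any exception -> origName
def TFlayerName2QuantizeKey (name : String) : String :=
  let origName := name
  match PySem.List.pyGet? (PySem.Chars.splitOnMax name.toList ['/'] 1) 0 with
  | none => origName
  | some base =>
    let underscores := ((PySem.List.enumerate base).filter (fun p => p.2 == '_')).map (·.1)
    let idx? : Option Int :=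
      if underscores.length ≤ 2 then
        if PySem.Chars.isIn "inception".toList base then PySem.List.pyGet? underscores 1
        else PySem.List.pyGet? underscores 0
      else PySem.List.pyGet? underscores 1
    match idx? with
    | none => origName
    | some i =>
      match PySem.List.pySet? base i '/' with
      | none => origName
      | some cs => String.ofList (PySem.Chars.join [] (cs.map (fun c => [c])))

-- ===== PORT B =====
-- hand port of Python str.partition(sep) on char lists, step for step:
-- scan for the first occurrence of sep, return (before, sep, after) or (s, '', '').
-- Exact for the nonempty seps B uses (Python raises ValueError only on sep = '').
def pyPartition (s : List Char) (sep : List Char) : List Char × List Char × List Char :=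
  match s with
  | [] => ([], [], [])
  | c :: t =>
    if sep.isPrefixOf (c :: t) then ([], sep, (c :: t).drop sep.length)
    else
      let (a, b, r) := pyPartition t sep
      (c :: a, b, r)

def TFlayerName2QuantizeKey_alt (name : String) : String :=
  let base := (pyPartition name.toList ['/']).1
  if PySem.Chars.count base ['_'] ≤ 2 ∧ PySem.Chars.isIn "inception".toList base = false then
    let (head, sep, tail) := pyPartition base ['_']
    if sep.isEmpty then name else String.ofList (head ++ '/' :: tail)
  else
    let (h1, _, rest) := pyPartition base ['_']
    let (h2, sep2, tail2) := pyPartition rest ['_']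
    if sep2.isEmpty then name else String.ofList (h1 ++ '_' :: h2 ++ '/' :: tail2)

-- ===== PRECONDITION & SPEC =====
def Spec_TFlayerName2QuantizeKey (name : String) (out : String) : Prop := out = TFlayerName2QuantizeKey_alt name
instance (name : String) (out : String) : Decidable (Spec_TFlayerName2QuantizeKey name out) := by unfold Spec_TFlayerName2QuantizeKey; infer_instance

-- ===== CLAIM (what is proved, stated in full; the proofs are below) =====
def Claim_equal_TFlayerName2QuantizeKey : Prop := ∀ (name : String), Dom_TFlayerName2QuantizeKey name → Spec_TFlayerName2QuantizeKey name (TFlayerName2QuantizeKey name)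

-- ===== LEMMAS AND PROOFS =====

-- positions of the occurrences of ch in s, in increasing order
def posL (ch : Char) : List Char → List Nat
  | [] => []
  | c :: t => if c = ch then 0 :: (posL ch t).map (· + 1) else (posL ch t).map (· + 1)

lemma posL_lt (ch : Char) : ∀ (s : List Char), ∀ x ∈ posL ch s, x < s.length := by
  intro s
  induction s with
  | nil => simp [posL]
  | cons c t ih =>
    intro x hx
    simp only [posL] at hx
    split at hx
    · rw [List.mem_cons] at hx
      rcases hx with rfl | hx
      · simp
      · simp only [List.mem_map] at hx
        obtain ⟨y, hy, rfl⟩ := hx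
        have := ih y hy; simp; omega
    · simp only [List.mem_map] at hx
      obtain ⟨y, hy, rfl⟩ := hx
      have := ih y hy; simp; omega

lemma posL_sorted (ch : Char) : ∀ (s : List Char), (posL ch s).Pairwise (· < ·) := by
  intro s
  induction s with
  | nil => simp [posL]
  | cons c t ih =>
    simp only [posL]
    have hmap : ((posL ch t).map (· + 1)).Pairwise (· < ·) := by
      refine List.pairwise_map.2 ?_
      exact ih.imp (by omega)
    split
    · refine List.pairwise_cons.2 ⟨?_, hmap⟩
      intro a ha
      simp only [List.mem_map] at ha
      obtain ⟨y, _, rfl⟩ := ha; omega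
    · exact hmap

lemma setMid (u v : List Char) (c d : Char) : (u ++ c :: v).set u.length d = u ++ d :: v := by
  induction u with
  | nil => simp
  | cons a u ih => simp [ih]

lemma setShift (u v : List Char) (c d : Char) (n : Nat) :
    (u ++ c :: v).set (u.length + 1 + n) d = u ++ c :: v.set n d := by
  induction u with
  | nil =>
      show (c :: v).set ([].length + 1 + n) d = c :: v.set n d
      rw [List.length_nil, Nat.zero_add, Nat.add_comm 1 n]
      rfl
  | cons a u ih =>
      show (a :: (u ++ c :: v)).set ((a :: u).length + 1 + n) d = a :: (u ++ c :: v.set n d)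
      rw [List.length_cons, show u.length + 1 + 1 + n = (u.length + 1 + n) + 1 from by omega]
      show a :: ((u ++ c :: v).set (u.length + 1 + n) d) = _
      rw [ih]

lemma enum_filter_eq (ch : Char) :
    ∀ (cs : List Char) (s : Int),
      ((PySem.List.enumerate cs s).filter (fun p => p.2 == ch)).map (·.1)
        = (posL ch cs).map (fun (n : Nat) => s + (n : Int)) := by
  intro cs
  induction cs with
  | nil => intro s; simp [PySem.List.enumerate_nil, posL]
  | cons c t ih =>
    intro s
    simp only [PySem.List.enumerate_cons, List.filter_cons, posL]
    by_cases h : c = ch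
    · simp only [h, beq_self_eq_true, if_pos]
      simp only [List.map_cons, ih (s+1), List.map_map]
      refine List.cons_eq_cons.2 ⟨by simp, ?_⟩
      apply List.map_congr_left
      intro n _
      simp [Function.comp]; omega
    · simp only [beq_iff_eq]
      rw [if_neg h, if_neg h, ih (s+1), List.map_map]
      apply List.map_congr_left
      intro n _
      simp; omega

lemma countGo (ch : Char) :
    ∀ (fuel : Nat) (l : List Char) (acc : Nat), l.length ≤ fuel →
      PySem.Chars.count.go [ch] fuel l acc = acc + (posL ch l).length := by
  intro fuel
  induction fuel with
  | zero =>
    intro l acc h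
    have : l = [] := List.length_eq_zero_iff.1 (Nat.le_zero.1 h)
    subst this
    simp [PySem.Chars.count.go, posL]
  | succ f ih =>
    intro l acc h
    match l with
    | [] => simp [PySem.Chars.count.go, posL]
    | c :: t =>
      simp only [PySem.Chars.count.go]
      by_cases hc : c = ch
      · rw [if_pos (by simp [List.isPrefixOf, hc])]
        rw [show List.drop [ch].length (c :: t) = t from rfl]
        rw [ih t (acc+1) (by simpa using Nat.lt_succ_iff.mp (by simpa using h))]
        simp [posL, hc]; omega
      · rw [if_neg (by simp [List.isPrefixOf]; exact fun hh => hc hh.symm)]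
        rw [ih t acc (by simpa using Nat.lt_succ_iff.mp (by simpa using h))]
        simp [posL, hc]

lemma count_eq_posL (ch : Char) (s : List Char) :
    PySem.Chars.count s [ch] = (posL ch s).length := by
  have : ([ch] : List Char).isEmpty = false := rfl
  simp only [PySem.Chars.count, this]
  simpa using countGo ch s.length s 0 le_rfl

lemma ppNone (ch : Char) : ∀ (s : List Char), posL ch s = [] → pyPartition s [ch] = (s, [], []) := by
  intro s
  induction s with
  | nil => intro _; rfl
  | cons c t ih =>
    intro h
    simp only [posL] at h
    split at h
    · exact absurd h (by simp)
    · rename_i hc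
      have ht : posL ch t = [] := by simpa using h
      simp only [pyPartition]
      rw [if_neg (by simp [List.isPrefixOf]; exact fun hh => hc hh.symm)]
      rw [ih ht]

lemma ppSome (ch : Char) : ∀ (s : List Char) (i : Nat) (r : List Nat), posL ch s = i :: r →
    pyPartition s [ch] = (s.take i, [ch], s.drop (i+1)) ∧
    posL ch (s.drop (i+1)) = r.map (· - (i+1)) := by
  intro s
  induction s with
  | nil => intro i r h; simp [posL] at h
  | cons c t ih =>
    intro i r h
    simp only [posL] at h
    split at h
    · rename_i hc
      injection h with hi hr
      subst hc
      subst hi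
      constructor
      · simp only [pyPartition]
        rw [if_pos (by simp [List.isPrefixOf])]
        simp
      · rw [List.drop_succ_cons, List.drop_zero, ← hr]
        apply Eq.symm
        rw [List.map_map]
        conv_lhs => rw [show ((fun x => x - (0+1)) ∘ fun x => x + 1) = id from funext (fun x => by simp)]
        simp
    · rename_i hc
      match hp : posL ch t with
      | [] => rw [hp] at h; simp at h
      | j :: r' =>
        rw [hp] at h
        simp only [List.map_cons] at h
        injection h with hi hr
        obtain ⟨hpp, hd⟩ := ih j r' hp
        subst hi
        constructor
        · simp only [pyPartition]
          rw [if_neg (by simp [List.isPrefixOf]; exact fun hh => hc hh.symm)]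
          rw [hpp]
          simp
        · rw [List.drop_succ_cons, hd, ← hr, List.map_map]
          apply List.map_congr_left
          intro n _
          simp [Function.comp]

lemma goZero (sep : List Char) : ∀ (fuel : Nat) (l cur : List Char) (acc : List (List Char)),
    PySem.Chars.splitOnMax.go sep fuel 0 l cur acc = ((cur.reverse ++ l) :: acc).reverse := by
  intro fuel l cur acc
  match fuel, l with
  | 0, l => rfl
  | f+1, [] => simp [PySem.Chars.splitOnMax.go]
  | f+1, c :: t => simp [PySem.Chars.splitOnMax.go]

lemma goOne (ch : Char) : ∀ (l : List Char) (fuel : Nat) (cur : List Char) (acc : List (List Char)),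
    l.length < fuel →
    PySem.Chars.splitOnMax.go [ch] fuel 1 l cur acc =
      (match pyPartition l [ch] with
       | (_, [], _) => ((cur.reverse ++ l) :: acc).reverse
       | (a, _, r) => (r :: (cur.reverse ++ a) :: acc).reverse) := by
  intro l
  induction l with
  | nil =>
    intro fuel cur acc h
    match fuel with
    | f+1 => simp [PySem.Chars.splitOnMax.go, pyPartition]
  | cons c t ih =>
    intro fuel cur acc h
    match fuel with
    | f+1 =>
      simp only [PySem.Chars.splitOnMax.go]
      rw [if_neg (by omega : ¬ (1 = 0))]
      by_cases hc : ([ch] : List Char).isPrefixOf (c :: t)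
      · rw [if_pos hc, goZero]
        simp only [pyPartition]
        rw [if_pos hc]
        simp
      · rw [if_neg hc, ih f (c :: cur) acc (by simpa using Nat.lt_of_succ_lt_succ (by simpa using h))]
        simp only [pyPartition]
        rw [if_neg hc]
        rcases hpt : pyPartition t [ch] with ⟨a, b, r⟩
        match b with
        | [] => simp
        | x :: xs => simp

lemma ppFstNoSep (ch : Char) : ∀ (s : List Char), (pyPartition s [ch]).2.1 = [] → (pyPartition s [ch]).1 = s := by
  intro s
  induction s with
  | nil => intro _; rfl
  | cons c t ih =>
    simp only [pyPartition]
    by_cases hc : ([ch] : List Char).isPrefixOf (c :: t)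
    · rw [if_pos hc]; intro h; simp at h
    · rw [if_neg hc]
      rcases hpt : pyPartition t [ch] with ⟨a, b, r⟩
      intro h
      simp only at h
      subst h
      simp only [List.cons.injEq, true_and]
      have := ih (by rw [hpt])
      rw [hpt] at this
      exact this

lemma baseA (cs : List Char) :
    PySem.List.pyGet? (PySem.Chars.splitOnMax cs ['/'] 1) 0 = some ((pyPartition cs ['/']).1) := by
  rw [PySem.Chars.splitOnMax]
  rw [if_neg (by omega : ¬ ((1:Int) < 0))]
  rw [show (1:Int).toNat = 1 from rfl]
  rw [goOne '/' cs (cs.length + 1) [] [] (by omega)]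
  rcases hpt : pyPartition cs ['/'] with ⟨a, b, r⟩
  match b with
  | [] =>
    have ha : a = cs := by have := ppFstNoSep '/' cs (by rw [hpt]); rw [hpt] at this; exact this
    subst ha
    simp [PySem.List.pyGet?, PySem.List.pyIdx?]
  | x :: xs =>
    simp [PySem.List.pyGet?, PySem.List.pyIdx?]

lemma posL_head_decomp (ch : Char) : ∀ (s : List Char) (i : Nat) (r : List Nat),
    posL ch s = i :: r → s = s.take i ++ ch :: s.drop (i+1) := by
  intro s
  induction s with
  | nil => intro i r h; simp [posL] at h
  | cons c t ih =>
    intro i r h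
    simp only [posL] at h
    split at h
    · rename_i hc
      injection h with hi _
      subst hc; subst hi
      simp
    · match hp : posL ch t with
      | [] => rw [hp] at h; simp at h
      | j :: r' =>
        rw [hp] at h
        simp only [List.map_cons] at h
        injection h with hi _
        subst hi
        have := ih j r' hp
        calc c :: t = c :: (t.take j ++ ch :: t.drop (j+1)) := by rw [← this]
        _ = (c :: t).take (j+1) ++ ch :: (c :: t).drop (j+1+1) := by simp

-- ===== VERDICT (by name: the statement is the Claim_ definition above) =====
theorem TFlayerName2QuantizeKey_spec : Claim_equal_TFlayerName2QuantizeKey := by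
  intro name _
  show TFlayerName2QuantizeKey name = TFlayerName2QuantizeKey_alt name
  unfold TFlayerName2QuantizeKey TFlayerName2QuantizeKey_alt
  rw [baseA name.toList]
  simp only [enum_filter_eq '_' _ 0, zero_add, List.length_map, count_eq_posL]
  rcases hp : posL '_' ((pyPartition name.toList ['/']).1) with _ | ⟨i, r⟩
  · -- no underscore in the base: both sides fall back to name
    rw [ppNone '_' _ hp]
    simp [PySem.List.pyGet?, pyPartition]
  · -- at least one underscore at position i
    obtain ⟨hpp, hdrop⟩ := ppSome '_' _ i r hp
    have hdec := posL_head_decomp '_' _ i r hp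
    have hilt : i < ((pyPartition name.toList ['/']).1).length :=
      posL_lt '_' _ i (by rw [hp]; exact List.mem_cons_self)
    have hset1 : ((pyPartition name.toList ['/']).1).set i '/' =
        ((pyPartition name.toList ['/']).1).take i ++ '/' :: ((pyPartition name.toList ['/']).1).drop (i+1) := by
      calc ((pyPartition name.toList ['/']).1).set i '/'
          = (((pyPartition name.toList ['/']).1).take i ++
              '_' :: ((pyPartition name.toList ['/']).1).drop (i+1)).set
              (((pyPartition name.toList ['/']).1).take i).length '/' := by
            rw [← hdec]; congr 1; simp [List.length_take]; omega
        _ = _ := setMid _ _ _ _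
    by_cases hC : ((i :: r).length ≤ 2 ∧
        PySem.Chars.isIn "inception".toList ((pyPartition name.toList ['/']).1) = false)
    · -- both replace the FIRST underscore
      rw [if_pos hC]
      have hA : (if (i :: r).length ≤ 2 then
            if PySem.Chars.isIn "inception".toList ((pyPartition name.toList ['/']).1) = true then
              PySem.List.pyGet? (List.map (fun (n : Nat) => (n : Int)) (i :: r)) 1
            else PySem.List.pyGet? (List.map (fun (n : Nat) => (n : Int)) (i :: r)) 0
          else PySem.List.pyGet? (List.map (fun (n : Nat) => (n : Int)) (i :: r)) 1)
          = PySem.List.pyGet? (List.map (fun (n : Nat) => (n : Int)) (i :: r)) 0 := by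
        obtain ⟨h1, h2⟩ := hC
        rw [if_pos h1, if_neg (by simp only [h2]; decide)]
      rw [hA]
      rw [show PySem.List.pyGet? (List.map (fun (n : Nat) => (n : Int)) (i :: r)) 0
            = some ((i : Nat) : Int) from by simp [PySem.List.pyGet?, PySem.List.pyIdx?]]
      simp only [hpp, PySem.List.pySet?_natCast _ i '/' hilt,
        PySem.Chars.join_nil_singletons, hset1, List.isEmpty_cons]
      simp
    · -- A replaces the second underscore (or falls back); so does B
      rw [if_neg hC]
      have hA : (if (i :: r).length ≤ 2 then
            if PySem.Chars.isIn "inception".toList ((pyPartition name.toList ['/']).1) = true then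
              PySem.List.pyGet? (List.map (fun (n : Nat) => (n : Int)) (i :: r)) 1
            else PySem.List.pyGet? (List.map (fun (n : Nat) => (n : Int)) (i :: r)) 0
          else PySem.List.pyGet? (List.map (fun (n : Nat) => (n : Int)) (i :: r)) 1)
          = PySem.List.pyGet? (List.map (fun (n : Nat) => (n : Int)) (i :: r)) 1 := by
        by_cases h1 : (i :: r).length ≤ 2
        · have hI : PySem.Chars.isIn "inception".toList ((pyPartition name.toList ['/']).1) = true := by
            rcases Bool.eq_false_or_eq_true
                (PySem.Chars.isIn "inception".toList ((pyPartition name.toList ['/']).1)) with h | h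
            · exact h
            · exact absurd ⟨h1, h⟩ hC
          rw [if_pos h1, if_pos hI]
        · rw [if_neg h1]
      rw [hA, hpp]
      rcases r with _ | ⟨j, r'⟩
      · -- only one underscore: A's us[1] raises, B's second partition finds no '_'
        rw [show PySem.List.pyGet? (List.map (fun (n : Nat) => (n : Int)) [i]) 1 = none from by
          simp [PySem.List.pyGet?, PySem.List.pyIdx?]]
        rw [ppNone '_' _ (by simpa using hdrop)]
        simp
      · -- a second underscore at position j
        have hij : i < j := by
          have := posL_sorted '_' ((pyPartition name.toList ['/']).1)
          rw [hp] at this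
          exact (List.pairwise_cons.1 this).1 j List.mem_cons_self
        have hdrop' : posL '_' (((pyPartition name.toList ['/']).1).drop (i+1))
            = (j - (i+1)) :: r'.map (· - (i+1)) := by simpa using hdrop
        obtain ⟨hpp2, _⟩ := ppSome '_' _ _ _ hdrop'
        have hdec2 := posL_head_decomp '_' _ _ _ hdrop'
        have hklt : j - (i+1) < (((pyPartition name.toList ['/']).1).drop (i+1)).length :=
          posL_lt '_' _ _ (by rw [hdrop']; exact List.mem_cons_self)
        have hjlt : j < ((pyPartition name.toList ['/']).1).length :=
          posL_lt '_' _ j (by rw [hp]; exact List.mem_cons_of_mem _ List.mem_cons_self)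
        rw [show PySem.List.pyGet? (List.map (fun (n : Nat) => (n : Int)) (i :: j :: r')) 1
              = some ((j : Nat) : Int) from by simp [PySem.List.pyGet?, PySem.List.pyIdx?]]

        have hsetj : ((pyPartition name.toList ['/']).1).set j '/' =
            ((pyPartition name.toList ['/']).1).take i ++
              '_' :: ((((pyPartition name.toList ['/']).1).drop (i+1)).take (j - (i+1)) ++
                '/' :: (((pyPartition name.toList ['/']).1).drop (i+1)).drop (j - (i+1) + 1)) := by
          calc ((pyPartition name.toList ['/']).1).set j '/'
              = (((pyPartition name.toList ['/']).1).take i ++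
                  '_' :: ((pyPartition name.toList ['/']).1).drop (i+1)).set
                  ((((pyPartition name.toList ['/']).1).take i).length + 1 + (j - (i+1))) '/' := by
                rw [← hdec]; congr 1; simp [List.length_take]; omega
            _ = ((pyPartition name.toList ['/']).1).take i ++
                  '_' :: ((((pyPartition name.toList ['/']).1).drop (i+1)).set (j - (i+1)) '/') := setShift _ _ _ _ _
            _ = _ := by
                congr 1
                congr 1
                calc (((pyPartition name.toList ['/']).1).drop (i+1)).set (j - (i+1)) '/'
                    = ((((pyPartition name.toList ['/']).1).drop (i+1)).take (j - (i+1)) ++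
                        '_' :: (((pyPartition name.toList ['/']).1).drop (i+1)).drop (j - (i+1) + 1)).set
                        ((((pyPartition name.toList ['/']).1).drop (i+1)).take (j - (i+1))).length '/' := by
                      rw [← hdec2]; congr 1; simp [List.length_take]; omega
                  _ = _ := setMid _ _ _ _
        simp only [hpp2, PySem.List.pySet?_natCast _ j '/' hjlt,
          PySem.Chars.join_nil_singletons, hsetj, List.isEmpty_cons]
        simp
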